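-- pv_equiv track=rewrite | github.com/AkeemMeade/RacketRecs | scripts/link_manufacturers.py | extract_brand_from_name
-- ===== SOURCE A (Python) =====
-- BRAND_MAPPINGS = {
--     'yonex': 'Yonex',
--     'victor': 'Victor',
--     'li-ning': 'Li-Ning',
--     'lining': 'Li-Ning',
--     'li ning': 'Li-Ning',
--     'hundred': 'Hundred',
--     'ashaway': 'Ashaway',
--     'apacs': 'Apacs',
--     'mizuno': 'Mizuno',
--     'gosen': 'Gosen',
--     'jnice': 'Jnice',
--     'technist': 'Technist',
-- }
--
-- def extract_brand_from_name(racket_name: str) -> str: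
--     """
--     Extract brand name from racket name.
--
--     Examples:
--     - "Yonex Astrox 88D Pro" -> "Yonex"
--     - "victor-auraspeed-90k" -> "Victor"
--     - "Li-Ning Axforce 100" -> "Li-Ning"
--     """
--     name_lower = racket_name.lower()
--
--     # Try to match known brands
--     for brand_key in sorted(BRAND_MAPPINGS.keys(), key=len, reverse=True):
--         if brand_key in name_lower:
--             return BRAND_MAPPINGS[brand_key]
--
--     # Fallback: check first word
--     first_word = racket_name.split()[0] if racket_name.split() else ''
--     if first_word.lower() in BRAND_MAPPINGS:
--         return BRAND_MAPPINGS[first_word.lower()]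
--
--     return None
-- ===== SOURCE B (Python) =====
-- BRAND_MAPPINGS = {
--     'yonex': 'Yonex',
--     'victor': 'Victor',
--     'li-ning': 'Li-Ning',
--     'lining': 'Li-Ning',
--     'li ning': 'Li-Ning',
--     'hundred': 'Hundred',
--     'ashaway': 'Ashaway',
--     'apacs': 'Apacs',
--     'mizuno': 'Mizuno',
--     'gosen': 'Gosen',
--     'jnice': 'Jnice',
--     'technist': 'Technist',
-- }
--
--
-- def extract_brand_from_name(racket_name: str) -> str:
--     """Collect every brand key occurring in the lowered name, then map the
--     longest one (first in dict order on ties, like A's stable sort)."""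
--     name_lower = racket_name.lower()
--     matches = [key for key in BRAND_MAPPINGS if key in name_lower]
--     if matches:
--         return BRAND_MAPPINGS[max(matches, key=len)]
--     return None
-- ===== Notes on version B (the rewrite author's own statement) =====
-- stated objective: simpler
-- what changed: Replaces A's sort-keys-by-length-then-early-return scan (plus its dead first-word fallback) with a filter of the matching brand keys followed by picking the longest match, whose first-on-tie rule over dict order reproduces A's stable-sort tie-break.
import Mathlib
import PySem

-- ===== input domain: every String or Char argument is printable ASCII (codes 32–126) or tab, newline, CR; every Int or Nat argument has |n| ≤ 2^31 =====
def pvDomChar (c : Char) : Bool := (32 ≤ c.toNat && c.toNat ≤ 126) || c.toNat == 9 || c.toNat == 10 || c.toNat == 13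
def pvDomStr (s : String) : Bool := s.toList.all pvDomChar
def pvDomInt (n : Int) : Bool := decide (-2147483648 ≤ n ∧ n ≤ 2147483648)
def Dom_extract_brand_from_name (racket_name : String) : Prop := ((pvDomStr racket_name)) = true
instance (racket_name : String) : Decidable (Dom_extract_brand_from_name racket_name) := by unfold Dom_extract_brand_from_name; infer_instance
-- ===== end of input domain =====

-- B replaces A's sort-by-length-then-early-return loop (plus a dead first-word fallback)
-- by a filter-then-pick-maximum decomposition; objective: simpler, same observable results.

-- ===== PORT A =====
def BRAND_MAPPINGS : PySem.Dict String String :=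
  PySem.Dict.ofList [("yonex", "Yonex"), ("victor", "Victor"), ("li-ning", "Li-Ning"),
    ("lining", "Li-Ning"), ("li ning", "Li-Ning"), ("hundred", "Hundred"),
    ("ashaway", "Ashaway"), ("apacs", "Apacs"), ("mizuno", "Mizuno"),
    ("gosen", "Gosen"), ("jnice", "Jnice"), ("technist", "Technist")]

-- A's 'for brand_key in …: if brand_key in name_lower: return BRAND_MAPPINGS[brand_key]'
def tryBrandKeys (name_lower : String) : List String → Option String
  | [] => none
  | k :: rest =>
    if PySem.Str.isIn k name_lower then BRAND_MAPPINGS.get? k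
    else tryBrandKeys name_lower rest

def extract_brand_from_name (racket_name : String) : Option String :=
  let name_lower := PySem.Str.lower racket_name
  match tryBrandKeys name_lower
      (PySem.List.sorted BRAND_MAPPINGS.keys (fun k => PySem.Str.len k) true) with
  | some r => some r
  | none =>
    let first_word :=
      match PySem.Str.split₀ racket_name with
      | w :: _ => w
      | [] => ""
    if BRAND_MAPPINGS.contains (PySem.Str.lower first_word) then
      BRAND_MAPPINGS.get? (PySem.Str.lower first_word)
    else none

-- ===== PORT B =====
def extract_brand_from_name_alt (racket_name : String) : Option String :=
  let name_lower := PySem.Str.lower racket_name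
  let found := BRAND_MAPPINGS.keys.filter (fun k => PySem.Str.isIn k name_lower)
  match PySem.List.max? found (fun k => PySem.Str.len k) with
  | some best => BRAND_MAPPINGS.get? best
  | none => none

-- ===== PRECONDITION & SPEC =====
def Spec_extract_brand_from_name (racket_name : String) (out : Option String) : Prop := out = extract_brand_from_name_alt racket_name
instance (racket_name : String) (out : Option String) : Decidable (Spec_extract_brand_from_name racket_name out) := by unfold Spec_extract_brand_from_name; infer_instance

-- ===== CLAIM (what is proved, stated in full; the proofs are below) =====
def Claim_equal_extract_brand_from_name : Prop := ∀ (racket_name : String), Dom_extract_brand_from_name racket_name → Spec_extract_brand_from_name racket_name (extract_brand_from_name racket_name)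

-- ===== LEMMAS AND PROOFS =====

lemma keys_literal : BRAND_MAPPINGS.keys =
    ["yonex", "victor", "li-ning", "lining", "li ning", "hundred",
     "ashaway", "apacs", "mizuno", "gosen", "jnice", "technist"] := by decide

lemma sorted_keys_literal :
    PySem.List.sorted BRAND_MAPPINGS.keys (fun k => PySem.Str.len k) true =
    ["technist", "li-ning", "li ning", "hundred", "ashaway", "victor",
     "lining", "mizuno", "yonex", "apacs", "gosen", "jnice"] := by decide

-- A's early-return scan over the length-sorted keys equals B's max-of-matches selection.
set_option maxHeartbeats 4000000 in
lemma loop_eq_max (nl : String) :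
    tryBrandKeys nl
      ["technist", "li-ning", "li ning", "hundred", "ashaway", "victor",
       "lining", "mizuno", "yonex", "apacs", "gosen", "jnice"] =
    (PySem.List.max?
        (["yonex", "victor", "li-ning", "lining", "li ning", "hundred",
          "ashaway", "apacs", "mizuno", "gosen", "jnice", "technist"].filter
          (fun k => PySem.Str.isIn k nl))
        (fun k => PySem.Str.len k)).bind (fun b => BRAND_MAPPINGS.get? b) := by
  simp only [tryBrandKeys, List.filter_cons, List.filter_nil]
  generalize PySem.Str.isIn "yonex" nl = b1
  generalize PySem.Str.isIn "victor" nl = b2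
  generalize PySem.Str.isIn "li-ning" nl = b3
  generalize PySem.Str.isIn "lining" nl = b4
  generalize PySem.Str.isIn "li ning" nl = b5
  generalize PySem.Str.isIn "hundred" nl = b6
  generalize PySem.Str.isIn "ashaway" nl = b7
  generalize PySem.Str.isIn "apacs" nl = b8
  generalize PySem.Str.isIn "mizuno" nl = b9
  generalize PySem.Str.isIn "gosen" nl = b10
  generalize PySem.Str.isIn "jnice" nl = b11
  generalize PySem.Str.isIn "technist" nl = b12
  revert b1 b2 b3 b4 b5 b6 b7 b8 b9 b10 b11 b12
  decide

-- every chunk produced by split₀ is an infix of the original character list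
lemma split₀_go_infix : ∀ (s cur : List Char) (acc : List (List Char)) (full : List Char),
    cur.reverse ++ s <:+ full → (∀ w ∈ acc, w <:+: full) →
    ∀ w ∈ PySem.Chars.split₀.go s cur acc, w <:+: full := by
  intro s
  induction s with
  | nil =>
    intro cur acc full hs hacc w hw
    simp only [PySem.Chars.split₀.go] at hw
    split at hw
    · exact hacc w (by simpa using hw)
    · rcases (by simpa using hw : w ∈ acc ∨ w = cur.reverse) with h | h
      · exact hacc w h
      · subst h
        exact (by simpa using hs : cur.reverse <:+ full).isInfix
  | cons c rest ih =>
    intro cur acc full hs hacc w hw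
    simp only [PySem.Chars.split₀.go] at hw
    split at hw
    · split at hw
      · refine ih [] acc full ?_ hacc w hw
        simpa using (List.suffix_cons c rest).trans ((List.suffix_append _ _).trans hs)
      · refine ih [] (cur.reverse :: acc) full ?_ ?_ w hw
        · simpa using (List.suffix_cons c rest).trans ((List.suffix_append _ _).trans hs)
        · intro w' hw'
          rcases List.mem_cons.mp hw' with h | h
          · subst h
            exact (List.prefix_append _ _).isInfix.trans hs.isInfix
          · exact hacc w' h
    · refine ih (c :: cur) acc full ?_ hacc w hw
      simpa using hs

lemma word_infix (cs w : List Char) (h : w ∈ PySem.Chars.split₀ cs) : w <:+: cs :=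
  split₀_go_infix cs [] [] cs (by simp) (by simp) w h

lemma first_word_isIn (s w : String) (hw : w ∈ PySem.Str.split₀ s) :
    PySem.Str.isIn (PySem.Str.lower w) (PySem.Str.lower s) = true := by
  simp only [PySem.Str.split₀, List.mem_map] at hw
  obtain ⟨l, hl, rfl⟩ := hw
  have hinf : l <:+: s.toList := word_infix _ _ hl
  rw [PySem.Str.isIn_iff_infix]
  have hmap : PySem.Chars.lower l <:+: PySem.Chars.lower s.toList := by
    simpa [PySem.Chars.lower] using hinf.map PySem.Chars.lowerChar
  simpa [PySem.Str.lower, PySem.Chars.lower] using hmap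

-- ===== VERDICT (by name: the statement is the Claim_ definition above) =====
theorem extract_brand_from_name_spec : Claim_equal_extract_brand_from_name := by
  intro s _
  unfold Spec_extract_brand_from_name
  simp only [extract_brand_from_name, extract_brand_from_name_alt]
  rw [sorted_keys_literal, keys_literal, loop_eq_max (PySem.Str.lower s)]
  cases hm : PySem.List.max?
      (["yonex", "victor", "li-ning", "lining", "li ning", "hundred",
        "ashaway", "apacs", "mizuno", "gosen", "jnice", "technist"].filter
        (fun k => PySem.Str.isIn k (PySem.Str.lower s)))
      (fun k => PySem.Str.len k) with
  | some m =>
    have hmem : m ∈ ["yonex", "victor", "li-ning", "lining", "li ning", "hundred",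
        "ashaway", "apacs", "mizuno", "gosen", "jnice", "technist"] :=
      (List.mem_filter.mp (PySem.List.max?_mem hm)).1
    have hsome : ∀ k ∈ (["yonex", "victor", "li-ning", "lining", "li ning", "hundred",
        "ashaway", "apacs", "mizuno", "gosen", "jnice", "technist"] : List String),
        (BRAND_MAPPINGS.get? k).isSome = true := by decide
    obtain ⟨v, hv⟩ := Option.isSome_iff_exists.mp (hsome m hmem)
    simp [hv]
  | none =>
    simp only [Option.bind_none]
    have hnil : (["yonex", "victor", "li-ning", "lining", "li ning", "hundred",
        "ashaway", "apacs", "mizuno", "gosen", "jnice", "technist"].filter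
        (fun k => PySem.Str.isIn k (PySem.Str.lower s))) = [] :=
      (PySem.List.max?_eq_none_iff _ _).mp hm
    have hall := List.filter_eq_nil_iff.mp hnil
    cases hw : PySem.Str.split₀ s with
    | nil =>
      have hc : BRAND_MAPPINGS.contains (PySem.Str.lower "") = false := by decide
      simp [hc]
    | cons w ws =>
      by_cases hc : BRAND_MAPPINGS.contains (PySem.Str.lower w) = true
      · exfalso
        have hmem : PySem.Str.lower w ∈ BRAND_MAPPINGS.keys :=
          (PySem.Dict.contains_iff_mem_keys _ _).mp hc
        rw [keys_literal] at hmem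
        exact hall _ hmem (by simpa using first_word_isIn s w (by rw [hw]; exact List.mem_cons_self ..))
      · rw [if_neg hc]
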